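-- pv_equiv track=rewrite | github.com/iSkylake/Algorithms | Python/Array/MostVowel.py | most_vowel_array
-- ===== SOURCE A (Python) =====
-- def most_vowel_array(array):
-- 	vowels = ['a', 'e', 'i', 'o', 'u']
-- 	max_vowel = [0, 0]
-- 	for string in range(len(array)):
-- 		vowel_count = 0
-- 		for letter in array[string]:
-- 			if letter in vowels:
-- 				vowel_count += 1
-- 		if vowel_count > max_vowel[1]:
-- 			max_vowel[0] = string
-- 			max_vowel[1] = vowel_count
--
-- 	return str(max_vowel[0])
-- ===== SOURCE B (Python) =====
-- def most_vowel_array(array):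
--     if not array:
--         return "0"
--     counts = [sum(1 for ch in s if ch in "aeiou") for s in array]
--     return str(counts.index(max(counts)))
-- ===== Notes on version B (the rewrite author's own statement) =====
-- stated objective: simpler
-- what changed: Replaces the interleaved count-and-track loop by first building a counts table with a comprehension and then returning str(counts.index(max(counts))), with an empty-input early return.
import Mathlib
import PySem

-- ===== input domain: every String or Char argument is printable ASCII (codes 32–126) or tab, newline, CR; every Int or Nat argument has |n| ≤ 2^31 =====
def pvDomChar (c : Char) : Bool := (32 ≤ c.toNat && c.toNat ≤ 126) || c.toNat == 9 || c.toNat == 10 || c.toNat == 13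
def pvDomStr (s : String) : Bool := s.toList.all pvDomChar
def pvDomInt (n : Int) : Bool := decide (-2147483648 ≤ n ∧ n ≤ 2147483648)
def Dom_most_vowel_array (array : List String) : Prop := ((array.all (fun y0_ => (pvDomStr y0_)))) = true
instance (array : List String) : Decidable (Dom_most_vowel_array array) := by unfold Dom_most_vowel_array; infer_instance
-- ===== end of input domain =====

-- B replaces A's interleaved count-and-track loop by a counts table followed by index(max(counts)); simpler, same cost.

-- ===== PORT A =====
def vowelsA : List Char := ['a', 'e', 'i', 'o', 'u']

def most_vowel_array (array : List String) : String :=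
  let mv := (PySem.List.pyRange 0 (array.length : Int) 1).foldl
    (fun (mv : Int × Int) i =>
      let vc := (PySem.List.pyGetD array i "").toList.foldl
        (fun vc letter => if letter ∈ vowelsA then vc + 1 else vc) (0 : Int)
      if vc > mv.2 then (i, vc) else mv) ((0 : Int), (0 : Int))
  PySem.Int.toStr mv.1

-- ===== PORT B =====
def vowelCount (s : String) : Int :=
  s.toList.foldl (fun acc ch => acc + (if ch ∈ "aeiou".toList then 1 else 0)) 0

def most_vowel_array_alt (array : List String) : String :=
  if array = [] then "0"
  else
    let counts := array.map vowelCount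
    let m := (PySem.List.max? counts (fun x => x)).getD 0
    PySem.Int.toStr (((PySem.List.index? counts m).getD 0 : Nat) : Int)

-- ===== PRECONDITION & SPEC =====
def Spec_most_vowel_array (array : List String) (out : String) : Prop := out = most_vowel_array_alt array
instance (array : List String) (out : String) : Decidable (Spec_most_vowel_array array out) := by unfold Spec_most_vowel_array; infer_instance

-- ===== CLAIM (what is proved, stated in full; the proofs are below) =====
def Claim_equal_most_vowel_array : Prop := ∀ (array : List String), Dom_most_vowel_array array → Spec_most_vowel_array array (most_vowel_array array)

-- ===== LEMMAS AND PROOFS =====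

-- A's step over an enumerated string
def aStep (mv : Int × Int) (p : Int × String) : Int × Int :=
  let vc := p.2.toList.foldl (fun vc letter => if letter ∈ vowelsA then vc + 1 else vc) (0 : Int)
  if vc > mv.2 then (p.1, vc) else mv

theorem countA_eq (l : List Char) (a : Int) :
    l.foldl (fun vc letter => if letter ∈ vowelsA then vc + 1 else vc) a
      = l.foldl (fun acc ch => acc + (if ch ∈ "aeiou".toList then 1 else 0)) a := by
  induction l generalizing a with
  | nil => rfl
  | cons c t ih =>
      simp only [List.foldl_cons]
      rw [ih]
      have hv : "aeiou".toList = vowelsA := rfl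
      rw [hv]
      congr 1
      split_ifs <;> omega

theorem vowelCount_nonneg_aux (l : List Char) (a : Int) :
    a ≤ l.foldl (fun acc ch => acc + (if ch ∈ "aeiou".toList then 1 else 0)) a := by
  induction l generalizing a with
  | nil => simp
  | cons c t ih =>
      refine le_trans ?_ (ih _)
      dsimp only
      split <;> omega

theorem vowelCount_nonneg (s : String) : 0 ≤ vowelCount s :=
  vowelCount_nonneg_aux s.toList 0

theorem aStep_eq (mv : Int × Int) (p : Int × String) :
    aStep mv p = if vowelCount p.2 > mv.2 then (p.1, vowelCount p.2) else mv := by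
  simp [aStep, vowelCount, countA_eq]

theorem main_lemma (array : List String) (h : array ≠ []) :
    ∃ (m : Int) (j : Nat),
      PySem.List.max? (array.map vowelCount) (fun x => x) = some m ∧
      PySem.List.index? (array.map vowelCount) m = some j ∧
      (PySem.List.enumerate array 0).foldl aStep ((0 : Int), (0 : Int)) = ((j : Int), m) := by
  induction array using List.reverseRecOn with
  | nil => exact absurd rfl h
  | append_singleton xs x ih =>
    by_cases hxs : xs = []
    · subst hxs
      refine ⟨vowelCount x, 0, ?_, ?_, ?_⟩
      · simp [PySem.List.max?_id_cons]
      · simp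
      · have h0 := vowelCount_nonneg x
        simp only [List.nil_append, PySem.List.enumerate_cons, PySem.List.enumerate_nil,
          List.foldl_cons, List.foldl_nil, aStep_eq]
        split_ifs with hgt
        · rfl
        · have hz : vowelCount x = 0 := le_antisymm (not_lt.mp hgt) h0
          simp [hz]
    · obtain ⟨m, j, hmax, hidx, hfold⟩ := ih hxs
      have hmap : xs.map vowelCount ≠ [] := by simpa using hxs
      obtain ⟨y, t, hyt⟩ := List.exists_cons_of_ne_nil hmap
      have hmax' : PySem.List.max? (xs.map vowelCount) (fun x => x) = some (t.foldl max y) := by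
        rw [hyt]; exact PySem.List.max?_id_cons ..
      have hm : m = t.foldl max y := by
        rw [hmax] at hmax'; exact Option.some_injective _ hmax'
      have hmapapp : (xs ++ [x]).map vowelCount = (xs.map vowelCount) ++ [vowelCount x] := by simp
      have hmaxapp : PySem.List.max? ((xs ++ [x]).map vowelCount) (fun x => x)
          = some (max m (vowelCount x)) := by
        rw [hmapapp, hyt, show (y :: t) ++ [vowelCount x] = y :: (t ++ [vowelCount x]) from rfl,
          PySem.List.max?_id_cons, List.foldl_append]
        simp [hm]
      have hfoldapp : (PySem.List.enumerate (xs ++ [x]) 0).foldl aStep ((0 : Int), (0 : Int))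
          = if vowelCount x > m then ((xs.length : Int), vowelCount x) else ((j : Int), m) := by
        rw [PySem.List.enumerate_append, List.foldl_append, hfold]
        simp [PySem.List.enumerate_cons, PySem.List.enumerate_nil, aStep_eq]
      by_cases hgt : m < vowelCount x
      · refine ⟨vowelCount x, xs.length, ?_, ?_, ?_⟩
        · rw [hmaxapp, max_eq_right (le_of_lt hgt)]
        · rw [hmapapp]
          have hnot : vowelCount x ∉ xs.map vowelCount := fun hmem =>
            absurd (PySem.List.max?_isMax hmax _ hmem) (not_le.mpr hgt)
          have := PySem.List.index?_append_singleton_self _ _ hnot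
          simpa using this
        · rw [hfoldapp]; simp [hgt]
      · refine ⟨m, j, ?_, ?_, ?_⟩
        · rw [hmaxapp, max_eq_left (not_lt.mp hgt)]
        · rw [hmapapp, PySem.List.index?_append_of_mem _ (PySem.List.max?_mem hmax), hidx]
        · rw [hfoldapp]; simp [hgt]

theorem most_vowel_array_eq_fold (array : List String) :
    most_vowel_array array
      = PySem.Int.toStr ((PySem.List.enumerate array 0).foldl aStep ((0 : Int), (0 : Int))).1 := by
  unfold most_vowel_array
  rw [PySem.List.enumerate_eq_map_pyRange array ""]
  rw [List.foldl_map]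
  rfl

-- ===== VERDICT (by name: the statement is the Claim_ definition above) =====
theorem most_vowel_array_spec : Claim_equal_most_vowel_array := by
  intro array _
  unfold Spec_most_vowel_array
  by_cases h : array = []
  · subst h; rfl
  · obtain ⟨m, j, hmax, hidx, hfold⟩ := main_lemma array h
    rw [most_vowel_array_eq_fold, hfold]
    unfold most_vowel_array_alt
    rw [PySem.List.index?_eq_idxOf?] at hidx
    simp [h, hmax, hidx]
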